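-- pv_equiv track=rewrite | github.com/PMBio/segger | scripts/download_standard_scrna_ref.py | immune_only_guess
-- ===== SOURCE A (Python) =====
-- IMMUNE_KEYWORDS = (
--     "t cell",
--     "b cell",
--     "nk",
--     "monocyte",
--     "macrophage",
--     "dendritic",
--     "neutrophil",
--     "mast",
--     "plasma",
--     "lymphocyte",
-- )
--
-- NON_IMMUNE_KEYWORDS = (
--     "epithelial",
--     "endothelial",
--     "fibroblast",
--     "stromal",
--     "hepatocyte",
--     "neuron",
--     "astrocyte",
--     "oligodendrocyte",
--     "acinar",
--     "ductal",
--     "tumor",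
--     "cancer",
-- )
--
-- def immune_only_guess(cell_types: list[str]) -> bool:
--     if not cell_types:
--         return False
--     lowered = [item.lower() for item in cell_types]
--     has_non_immune = any(any(token in item for token in NON_IMMUNE_KEYWORDS) for item in lowered)
--     if has_non_immune:
--         return False
--     has_immune = any(any(token in item for token in IMMUNE_KEYWORDS) for item in lowered)
--     return has_immune
-- ===== SOURCE B (Python) =====
-- IMMUNE_KEYWORDS = (
--     "t cell", "b cell", "nk", "monocyte", "macrophage",
--     "dendritic", "neutrophil", "mast", "plasma", "lymphocyte",
-- )
--
-- NON_IMMUNE_KEYWORDS = (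
--     "epithelial", "endothelial", "fibroblast", "stromal", "hepatocyte",
--     "neuron", "astrocyte", "oligodendrocyte", "acinar", "ductal",
--     "tumor", "cancer",
-- )
--
-- def immune_only_guess(cell_types: list[str]) -> bool:
--     has_immune = False
--     for item in cell_types:
--         low = item.lower()
--         if any(tok in low for tok in NON_IMMUNE_KEYWORDS):
--             return False
--         if any(tok in low for tok in IMMUNE_KEYWORDS):
--             has_immune = True
--     return has_immune
-- ===== Notes on version B (the rewrite author's own statement) =====
-- stated objective: simpler
-- what changed: Replaces the lowered-copy list plus two separate full-list any-scans (non-immune, then immune) with one short-circuiting pass that lowercases each item once, returns False immediately on a non-immune match and accumulates an immune flag; the empty list is handled implicitly by the loop.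
import Mathlib
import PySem

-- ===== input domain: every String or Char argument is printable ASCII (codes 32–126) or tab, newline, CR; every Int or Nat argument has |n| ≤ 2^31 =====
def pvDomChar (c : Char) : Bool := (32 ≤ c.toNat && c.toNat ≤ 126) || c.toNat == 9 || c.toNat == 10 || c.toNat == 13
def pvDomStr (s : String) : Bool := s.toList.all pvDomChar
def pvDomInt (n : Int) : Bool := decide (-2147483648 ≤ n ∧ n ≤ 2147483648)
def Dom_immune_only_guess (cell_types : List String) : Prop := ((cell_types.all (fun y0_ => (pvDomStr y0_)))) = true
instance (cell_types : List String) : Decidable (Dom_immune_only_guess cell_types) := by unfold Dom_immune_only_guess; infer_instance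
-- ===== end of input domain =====

-- B replaces A's lowered-copy list and two separate full-list scans with one
-- short-circuiting pass that lowercases each item once (objective: simpler).


def IMMUNE_KEYWORDS : List String :=
  ["t cell", "b cell", "nk", "monocyte", "macrophage",
   "dendritic", "neutrophil", "mast", "plasma", "lymphocyte"]

def NON_IMMUNE_KEYWORDS : List String :=
  ["epithelial", "endothelial", "fibroblast", "stromal", "hepatocyte",
   "neuron", "astrocyte", "oligodendrocyte", "acinar", "ductal",
   "tumor", "cancer"]

-- ===== PORT A =====
def immune_only_guess (cell_types : List String) : Bool :=
  if cell_types.isEmpty then false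
  else
    let lowered := cell_types.map PySem.Str.lower
    let has_non_immune :=
      lowered.any (fun item => NON_IMMUNE_KEYWORDS.any (fun token => PySem.Str.isIn token item))
    if has_non_immune then false
    else
      lowered.any (fun item => IMMUNE_KEYWORDS.any (fun token => PySem.Str.isIn token item))

-- ===== PORT B =====
def immuneAltLoop : List String → Bool → Bool
  | [], has_immune => has_immune
  | item :: rest, has_immune =>
    let low := PySem.Str.lower item
    if NON_IMMUNE_KEYWORDS.any (fun tok => PySem.Str.isIn tok low) then false
    else immuneAltLoop rest
      (has_immune || IMMUNE_KEYWORDS.any (fun tok => PySem.Str.isIn tok low))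

def immune_only_guess_alt (cell_types : List String) : Bool :=
  immuneAltLoop cell_types false

-- ===== PRECONDITION & SPEC =====
def Spec_immune_only_guess (cell_types : List String) (out : Bool) : Prop := out = immune_only_guess_alt cell_types
instance (cell_types : List String) (out : Bool) : Decidable (Spec_immune_only_guess cell_types out) := by unfold Spec_immune_only_guess; infer_instance

-- ===== CLAIM (what is proved, stated in full; the proofs are below) =====
def Claim_equal_immune_only_guess : Prop := ∀ (cell_types : List String), Dom_immune_only_guess cell_types → Spec_immune_only_guess cell_types (immune_only_guess cell_types)

-- ===== LEMMAS AND PROOFS =====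

-- The single-pass loop equals: false on any non-immune match, else acc OR any immune match.
theorem immuneAltLoop_eq (l : List String) (acc : Bool) :
    immuneAltLoop l acc =
      if l.any (fun item => NON_IMMUNE_KEYWORDS.any
          (fun tok => PySem.Str.isIn tok (PySem.Str.lower item))) then false
      else acc || l.any (fun item => IMMUNE_KEYWORDS.any
          (fun tok => PySem.Str.isIn tok (PySem.Str.lower item))) := by
  induction l generalizing acc with
  | nil => simp only [immuneAltLoop, List.any_nil, Bool.false_eq_true, if_false, Bool.or_false]
  | cons x rest ih =>
    simp only [immuneAltLoop, List.any_cons]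
    by_cases hx : NON_IMMUNE_KEYWORDS.any (fun tok => PySem.Str.isIn tok (PySem.Str.lower x)) = true
    · simp only [hx, Bool.true_or, if_true]
    · simp only [Bool.not_eq_true] at hx
      simp only [hx, Bool.false_or, Bool.false_eq_true, if_false]
      rw [ih]
      split_ifs with h
      · rfl
      · rw [Bool.or_assoc]

-- ===== VERDICT (by name: the statement is the Claim_ definition above) =====
theorem immune_only_guess_spec : Claim_equal_immune_only_guess := by
  intro cell_types _
  unfold Spec_immune_only_guess immune_only_guess immune_only_guess_alt
  rw [immuneAltLoop_eq]
  cases cell_types with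
  | nil => rfl
  | cons x rest =>
    simp only [List.isEmpty_cons, Bool.false_eq_true, if_false, List.any_map,
      List.any_cons, Function.comp, Bool.false_or]
    rfl
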